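-- pv_equiv track=rewrite | github.com/abdimk/ethiojobs | utils/status_code_file.py | http_status
-- ===== SOURCE A (Python) =====
-- def http_status(request):
--     HTTP = {'OK': 200, 'ACCEPTED': 202,'NON_AUTHORITATIVE_INFORMATION': 203, 'NO_CONTENT': 204, 'NOT_MODIFIED': 304,
--             'USE_PROXY': 305, 'TEMPORARY_REDIRECT': 307, 'PERMANENT_REDIRECT': 308, 'BAD_REQUEST': 400,
--             'UNAUTHORIZED': 402, 'FORBIDDEN': 403, 'NOT_FOUND': 404, 'NOT_ACCEPTABLE': 406,
--             'PROXY_AUTHENTICATION_REQUIRED': 407, 'REQUEST_TIMEOUT': 408, 'MISDIRECTED_REQUEST': 421,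
--             'UPGRADE_REQUIRED': 426, 'TOO_MANY_REQUESTS': 429, 'NETWORK_AUTHENTICATION_REQUIRED': 511}
--     for key, value in HTTP.items():
--             if request == value:
--                 return key
--             else:
--                 pass
-- ===== SOURCE B (Python) =====
-- # Inverted code->name table built once; direct keyed lookup replaces A's linear value-scan.
-- _HTTP = {'OK': 200, 'ACCEPTED': 202, 'NON_AUTHORITATIVE_INFORMATION': 203, 'NO_CONTENT': 204,
--          'NOT_MODIFIED': 304, 'USE_PROXY': 305, 'TEMPORARY_REDIRECT': 307, 'PERMANENT_REDIRECT': 308,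
--          'BAD_REQUEST': 400, 'UNAUTHORIZED': 402, 'FORBIDDEN': 403, 'NOT_FOUND': 404,
--          'NOT_ACCEPTABLE': 406, 'PROXY_AUTHENTICATION_REQUIRED': 407, 'REQUEST_TIMEOUT': 408,
--          'MISDIRECTED_REQUEST': 421, 'UPGRADE_REQUIRED': 426, 'TOO_MANY_REQUESTS': 429,
--          'NETWORK_AUTHENTICATION_REQUIRED': 511}
-- _CODES = {v: k for k, v in _HTTP.items()}
--
-- def http_status(request):
--     return _CODES.get(request)
-- ===== Notes on version B (the rewrite author's own statement) =====
-- stated objective: idiomatic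
-- what changed: Replaces the per-call linear scan over the dict's values with a module-level inverted code->name table and a single .get lookup.
import Mathlib
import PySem

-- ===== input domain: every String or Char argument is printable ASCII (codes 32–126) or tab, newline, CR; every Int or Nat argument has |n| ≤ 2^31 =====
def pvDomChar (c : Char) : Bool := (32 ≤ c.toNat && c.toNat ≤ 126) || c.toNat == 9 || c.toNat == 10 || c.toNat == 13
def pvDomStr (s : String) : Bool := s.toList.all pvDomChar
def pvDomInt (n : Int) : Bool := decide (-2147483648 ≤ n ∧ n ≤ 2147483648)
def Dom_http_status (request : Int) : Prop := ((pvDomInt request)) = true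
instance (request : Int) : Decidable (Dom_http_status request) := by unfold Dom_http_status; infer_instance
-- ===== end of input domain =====

-- ===== PORT A =====
-- A builds the name->code dict and scans its items, returning the first key whose value equals request.
def httpTableA : PySem.Dict String Int :=
  PySem.Dict.ofList [("OK", 200), ("ACCEPTED", 202), ("NON_AUTHORITATIVE_INFORMATION", 203),
    ("NO_CONTENT", 204), ("NOT_MODIFIED", 304), ("USE_PROXY", 305), ("TEMPORARY_REDIRECT", 307),
    ("PERMANENT_REDIRECT", 308), ("BAD_REQUEST", 400), ("UNAUTHORIZED", 402), ("FORBIDDEN", 403),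
    ("NOT_FOUND", 404), ("NOT_ACCEPTABLE", 406), ("PROXY_AUTHENTICATION_REQUIRED", 407),
    ("REQUEST_TIMEOUT", 408), ("MISDIRECTED_REQUEST", 421), ("UPGRADE_REQUIRED", 426),
    ("TOO_MANY_REQUESTS", 429), ("NETWORK_AUTHENTICATION_REQUIRED", 511)]

-- the for-loop with early return: first (key, value) with request == value
def httpLoopA (request : Int) : List (String × Int) → Option String
  | [] => none
  | (key, value) :: rest => if request == value then some key else httpLoopA request rest

def http_status (request : Int) : Option String :=
  httpLoopA request httpTableA.items

-- ===== PORT B =====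
-- B: inverted code->name dict built once; a single keyed lookup (.get → Dict.get?).
def httpCodesB : PySem.Dict Int String :=
  PySem.Dict.ofList [(200, "OK"), (202, "ACCEPTED"), (203, "NON_AUTHORITATIVE_INFORMATION"),
    (204, "NO_CONTENT"), (304, "NOT_MODIFIED"), (305, "USE_PROXY"), (307, "TEMPORARY_REDIRECT"),
    (308, "PERMANENT_REDIRECT"), (400, "BAD_REQUEST"), (402, "UNAUTHORIZED"), (403, "FORBIDDEN"),
    (404, "NOT_FOUND"), (406, "NOT_ACCEPTABLE"), (407, "PROXY_AUTHENTICATION_REQUIRED"),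
    (408, "REQUEST_TIMEOUT"), (421, "MISDIRECTED_REQUEST"), (426, "UPGRADE_REQUIRED"),
    (429, "TOO_MANY_REQUESTS"), (511, "NETWORK_AUTHENTICATION_REQUIRED")]

def http_status_alt (request : Int) : Option String :=
  httpCodesB.get? request

-- ===== PRECONDITION & SPEC =====
def Spec_http_status (request : Int) (out : Option String) : Prop := out = http_status_alt request
instance (request : Int) (out : Option String) : Decidable (Spec_http_status request out) := by unfold Spec_http_status; infer_instance

-- ===== CLAIM (what is proved, stated in full; the proofs are below) =====
def Claim_equal_http_status : Prop := ∀ (request : Int), Dom_http_status request → Spec_http_status request (http_status request)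

-- ===== LEMMAS AND PROOFS =====
-- A's first-match scan over (name, code) pairs equals a dict lookup in the swapped dict.
theorem httpLoopA_eq_get? (r : Int) (l : List (String × Int)) :
    httpLoopA r l = (PySem.Dict.mk (l.map (fun p => (p.2, p.1)))).get? r := by
  induction l with
  | nil => simp [httpLoopA, PySem.Dict.get?]
  | cons p rest ih =>
    by_cases h : r = p.2
    · simp [httpLoopA, PySem.Dict.get?_mk_cons, h]
    · simp [httpLoopA, PySem.Dict.get?_mk_cons, h, Ne.symm h, ih]

-- B's dict is exactly A's table with each pair swapped (checked by evaluation).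
theorem httpCodesB_eq_swap :
    httpCodesB = PySem.Dict.mk (httpTableA.items.map (fun p => (p.2, p.1))) := by decide

-- ===== VERDICT (by name: the statement is the Claim_ definition above) =====
theorem http_status_spec : Claim_equal_http_status := by
  intro request _
  unfold Spec_http_status http_status http_status_alt
  rw [httpLoopA_eq_get?, httpCodesB_eq_swap]
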